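-- pv_equiv track=rewrite | github.com/yarongoldshtein/ticTacToe | PvPBoard.py | convert_number_to_position
-- ===== SOURCE A (Python) =====
-- def convert_number_to_position(num):
--     i, j = 0, -1
--     for k in range(int(num)):
--         j += 1
--         if j > 2:
--             i += 1
--             j = 0
--     return i, j
-- ===== SOURCE B (Python) =====
-- def convert_number_to_position(num):
--     n = int(num)
--     if n <= 0:
--         return 0, -1
--     i, j = divmod(n - 1, 3)
--     return i, j
-- ===== Notes on version B (the rewrite author's own statement) =====
-- stated objective: faster
-- what changed: replaces A's counting loop, which steps through every cell one by one, by a constant-time divmod closed form (with the empty-loop case for non-positive input handled directly)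
import Mathlib
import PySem

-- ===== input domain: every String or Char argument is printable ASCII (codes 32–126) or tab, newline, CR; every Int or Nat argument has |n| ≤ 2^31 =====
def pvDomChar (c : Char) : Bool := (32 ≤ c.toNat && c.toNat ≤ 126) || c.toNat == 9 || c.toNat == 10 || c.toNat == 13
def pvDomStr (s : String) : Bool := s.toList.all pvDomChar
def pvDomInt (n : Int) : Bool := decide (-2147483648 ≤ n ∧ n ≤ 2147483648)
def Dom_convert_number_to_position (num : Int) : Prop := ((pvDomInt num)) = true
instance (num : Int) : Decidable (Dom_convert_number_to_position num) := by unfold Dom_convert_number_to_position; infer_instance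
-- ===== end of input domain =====

-- B replaces A's linear counting loop by a constant-time divmod closed form.

-- ===== PORT A =====
-- the loop body: j += 1; if j > 2: i += 1; j = 0
def cnpStep (p : Int × Int) (_k : Int) : Int × Int :=
  let j := p.2 + 1
  if j > 2 then (p.1 + 1, 0) else (p.1, j)

def convert_number_to_position (num : Int) : List Int :=
  let st := (PySem.List.pyRange 0 num 1).foldl cnpStep (0, -1)
  [st.1, st.2]

-- ===== PORT B =====
def convert_number_to_position_alt (num : Int) : List Int :=
  if num ≤ 0 then [0, -1]
  else [PySem.Int.floordiv (num - 1) 3, PySem.Int.mod (num - 1) 3]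

-- ===== PRECONDITION & SPEC =====
def Spec_convert_number_to_position (num : Int) (out : List Int) : Prop := out = convert_number_to_position_alt num
instance (num : Int) (out : List Int) : Decidable (Spec_convert_number_to_position num out) := by unfold Spec_convert_number_to_position; infer_instance

-- ===== CLAIM (what is proved, stated in full; the proofs are below) =====
def Claim_equal_convert_number_to_position : Prop := ∀ (num : Int), Dom_convert_number_to_position num → Spec_convert_number_to_position num (convert_number_to_position num)

-- ===== LEMMAS AND PROOFS =====

lemma cnp_loop_eq (n : Nat) :
    (PySem.List.pyRange 0 (n : Int) 1).foldl cnpStep (0, -1)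
      = if n = 0 then ((0 : Int), (-1 : Int))
        else ((((n - 1) / 3 : Nat) : Int), (((n - 1) % 3 : Nat) : Int)) := by
  induction n with
  | zero => simp
  | succ m ih =>
    have h1 : (0 : Int) ≤ (m : Int) := by positivity
    have hsplit : PySem.List.pyRange 0 ((m : Int) + 1) 1
        = PySem.List.pyRange 0 (m : Int) 1 ++ [(m : Int)] :=
      PySem.List.pyRange_one_succ_right h1
    have : ((m + 1 : Nat) : Int) = (m : Int) + 1 := by push_cast; ring
    rw [this, hsplit, List.foldl_append, ih]
    by_cases hm : m = 0
    · subst hm; simp [cnpStep]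
    · simp only [if_neg hm, if_neg (Nat.succ_ne_zero m)]
      have hlt : (m - 1) % 3 < 3 := Nat.mod_lt _ (by norm_num)
      interval_cases h : (m - 1) % 3 <;>
      · simp only [List.foldl, cnpStep]
        norm_num
        constructor <;> [skip; try rfl] <;> omega

theorem convert_number_to_position_spec : Claim_equal_convert_number_to_position := by
  intro num _
  unfold Spec_convert_number_to_position convert_number_to_position convert_number_to_position_alt
  by_cases h : num ≤ 0
  · rw [if_pos h, PySem.List.pyRange_one_eq_nil h]
    rfl
  · rw [if_neg h]
    have hnn : (0 : Int) ≤ num := by omega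
    have hnum : num = ((num.toNat : Nat) : Int) := by omega
    have hpos : num.toNat ≠ 0 := by omega
    rw [hnum, cnp_loop_eq, if_neg hpos]
    have h3 : (0 : Int) < 3 := by norm_num
    rw [PySem.Int.floordiv_eq_ediv_of_pos h3, PySem.Int.mod_eq_emod_of_pos h3]
    simp only [List.cons.injEq, and_true]
    constructor <;> omega
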